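-- pv_equiv track=rewrite | github.com/theXYZT/google-kick-start-2021 | Round B/longest-progression.py | solve
-- ===== SOURCE A (Python) =====
-- import itertools
-- from collections import namedtuple
--
-- Chunk = namedtuple("Chunk", ["k", "d"])
--
-- def solve(N, A):
--     if N <= 3:
--         return N
--
--     D = [A[i] - A[i-1] for i in range(1, N)]
--     chunks = [Chunk(len(list(g)), d) for d, g in itertools.groupby(D)]
--
--     best = 1
--     for i, z in enumerate(chunks):
--         best = max(best, z.k)
--         if i > 0 or i < len(chunks) - 1:
--             best = max(best, z.k + 1)
--
--         if i > 1:
--             x, y = chunks[i-2], chunks[i-1]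
--
--             if y.k == 1 and x.d + y.d == 2 * z.d:
--                 best = max(best, z.k + 2)
--
--                 if i > 2 and x.k == 1 and z.d == chunks[i-3].d:
--                     best = max(best, z.k + 2 + chunks[i-3].k)
--
--         if i < len(chunks) - 2:
--             a, b = chunks[i+1], chunks[i+2]
--
--             if a.k == 1 and a.d + b.d == 2 * z.d:
--                 best = max(best, z.k + 2)
--
--     return best + 1
-- ===== SOURCE B (Python) =====
-- def solve(N, A):
--     if N <= 3:
--         return N
--
--     M = N - 1
--     D = [A[i + 1] - A[i] for i in range(M)]
--
--     # l[i]: length of the maximal constant run of D ending at i; r[i]: starting at i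
--     l = [1] * M
--     for i in range(1, M):
--         if D[i] == D[i - 1]:
--             l[i] = l[i - 1] + 1
--     r = [1] * M
--     for i in range(M - 2, -1, -1):
--         if D[i] == D[i + 1]:
--             r[i] = r[i + 1] + 1
--
--     best = 0
--     for i in range(M):
--         # a constant run, possibly extended by one diff freed by changing an
--         # element just outside it
--         ext = 1 if (i - l[i] >= 0 or i + 1 < M) else 0
--         best = max(best, l[i] + ext)
--
--     # changing A[p+1] rewrites the pair D[p], D[p+1] preserving its sum
--     for p in range(M - 1):
--         s = D[p] + D[p + 1]
--         if p >= 1 and s == 2 * D[p - 1]: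
--             c = l[p - 1] + 2
--             if p + 2 < M and D[p + 2] == D[p - 1]:
--                 c += r[p + 2]
--             best = max(best, c)
--         if p + 2 < M and s == 2 * D[p + 2]:
--             best = max(best, 2 + r[p + 2])
--
--     return best + 1
-- ===== Notes on version B (the rewrite author's own statement) =====
-- stated objective: faster
-- what changed: Replaces A's groupby run-length chunk list and indexed chunk loop (looking up to three chunks back and two ahead) by two linear run-length DP arrays over the difference list (run ending / run starting at each diff) plus one scan over adjacent diff pairs that a single element change can rewrite.
import Mathlib
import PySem

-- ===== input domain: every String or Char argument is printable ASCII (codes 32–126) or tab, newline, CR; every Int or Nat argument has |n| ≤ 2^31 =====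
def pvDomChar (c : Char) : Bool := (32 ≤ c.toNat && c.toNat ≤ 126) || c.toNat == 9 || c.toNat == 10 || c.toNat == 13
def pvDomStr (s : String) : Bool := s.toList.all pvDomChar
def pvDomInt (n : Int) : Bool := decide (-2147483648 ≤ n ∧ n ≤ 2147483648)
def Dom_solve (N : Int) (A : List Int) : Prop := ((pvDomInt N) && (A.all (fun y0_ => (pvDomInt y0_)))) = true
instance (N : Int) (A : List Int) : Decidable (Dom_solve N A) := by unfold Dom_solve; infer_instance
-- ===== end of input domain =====

-- B replaces A's run-length-encoding of the difference array (groupby + an indexed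
-- chunk loop looking up to three chunks back and two ahead) by two linear run-length
-- DP arrays over the diffs (l/r) plus a scan over adjacent diff pairs; same O(n)
-- asymptotics, measurably faster by a constant factor (plain integer scans, no
-- chunk objects).

-- ===== PORT A =====
-- D = [A[i] - A[i-1] for i in range(1, N)]
def pvDiffsA (N : Int) (A : List Int) : List Int :=
  (PySem.List.pyRange 1 N 1).map (fun i => PySem.List.pyGetD A i 0 - PySem.List.pyGetD A (i - 1) 0)

-- chunks = [Chunk(len(list(g)), d) for d, g in itertools.groupby(D)]  (chunk = (k, d))
def pvRle : List Int → List (Int × Int)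
  | [] => []
  | d :: rest =>
    match pvRle rest with
    | [] => [(1, d)]
    | (k, d') :: tl => if d = d' then (k + 1, d) :: tl else (1, d) :: (k, d') :: tl

-- the 'for i, z in enumerate(chunks)' loop of A, literally
def pvLoopA (cs : List (Int × Int)) : Int :=
  (List.range cs.length).foldl (fun best i =>
    let z := cs.getD i (0, 0)
    let best := max best z.1
    let best := if 0 < i ∨ i < cs.length - 1 then max best (z.1 + 1) else best
    let best :=
      if 1 < i then
        let x := cs.getD (i - 2) (0, 0)
        let y := cs.getD (i - 1) (0, 0)
        if y.1 = 1 ∧ x.2 + y.2 = 2 * z.2 then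
          let best := max best (z.1 + 2)
          if 2 < i ∧ x.1 = 1 ∧ z.2 = (cs.getD (i - 3) (0, 0)).2 then
            max best (z.1 + 2 + (cs.getD (i - 3) (0, 0)).1)
          else best
        else best
      else best
    if i < cs.length - 2 then
      let a := cs.getD (i + 1) (0, 0)
      let b := cs.getD (i + 2) (0, 0)
      if a.1 = 1 ∧ a.2 + b.2 = 2 * z.2 then max best (z.1 + 2) else best
    else best) 1

def solve (N : Int) (A : List Int) : Int :=
  if N ≤ 3 then N
  else pvLoopA (pvRle (pvDiffsA N A)) + 1

-- ===== PORT B =====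
-- D = [A[i+1] - A[i] for i in range(N - 1)]
def pvDiffsB (N : Int) (A : List Int) : List Int :=
  (PySem.List.pyRange 0 (N - 1) 1).map (fun i => PySem.List.pyGetD A (i + 1) 0 - PySem.List.pyGetD A i 0)

-- l[i] = if D[i] == D[i-1] then l[i-1] + 1 else 1: the forward filling loop as a
-- recursion carrying (D[i-1], l[i-1]); same values, step for step
def pvLvalsGo (prev c : Int) : List Int → List Int
  | [] => []
  | d :: rest =>
      let c' := if d = prev then c + 1 else 1
      c' :: pvLvalsGo d c' rest

def pvLvals : List Int → List Int
  | [] => []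
  | d :: rest => 1 :: pvLvalsGo d 1 rest

-- r[i] = if D[i] == D[i+1] then r[i+1] + 1 else 1: the backward filling loop as a
-- structural recursion from the right; same values
def pvRvals : List Int → List Int
  | [] => []
  | [_] => [1]
  | d :: d' :: rest =>
      let r := pvRvals (d' :: rest)
      (if d = d' then r.headD 0 + 1 else 1) :: r

-- first candidate loop of Source B: runs, possibly extended by one freed diff
def pvRunFold (M : Nat) (l : List Int) : Int :=
  (List.range M).foldl (fun best i =>
    let li := l.getD i 0
    let ext : Int := if 0 ≤ (i : Int) - li ∨ i + 1 < M then 1 else 0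
    max best (li + ext)) 0

-- second candidate loop of Source B: changing A[p+1] rewrites the pair D[p], D[p+1]
-- preserving its sum
def pvBridgeFold (M : Nat) (D l r : List Int) (b0 : Int) : Int :=
  (List.range (M - 1)).foldl (fun best p =>
    let s := D.getD p 0 + D.getD (p + 1) 0
    let best :=
      if 1 ≤ p ∧ s = 2 * D.getD (p - 1) 0 then
        let c := l.getD (p - 1) 0 + 2
        let c := if p + 2 < M ∧ D.getD (p + 2) 0 = D.getD (p - 1) 0 then c + r.getD (p + 2) 0 else c
        max best c
      else best
    if p + 2 < M ∧ s = 2 * D.getD (p + 2) 0 then max best (2 + r.getD (p + 2) 0) else best) b0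

def solve_alt (N : Int) (A : List Int) : Int :=
  if N ≤ 3 then N
  else
    let D := pvDiffsB N A
    let M := D.length
    pvBridgeFold M D (pvLvals D) (pvRvals D) (pvRunFold M (pvLvals D)) + 1

-- ===== PRECONDITION & SPEC =====
-- Pre_ excludes exactly the inputs where A raises IndexError: 4 ≤ N but A has
-- fewer than N elements (both programs index A[0..N-1] then).
def Pre_solve (N : Int) (A : List Int) : Prop := N ≤ 3 ∨ N ≤ (A.length : Int)
instance (N : Int) (A : List Int) : Decidable (Pre_solve N A) := by unfold Pre_solve; infer_instance

def pvWitness_solve : Int × List Int := (5, [1, 2, 4, 8, 16])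

def Spec_solve (N : Int) (A : List Int) (out : Int) : Prop := out = solve_alt N A
instance (N : Int) (A : List Int) (out : Int) : Decidable (Spec_solve N A out) := by unfold Spec_solve; infer_instance

-- ===== CLAIM (what is proved, stated in full; the proofs are below) =====
def Claim_equal_solve : Prop := ∀ (N : Int) (A : List Int), Dom_solve N A → Pre_solve N A → Spec_solve N A (solve N A)

-- ===== LEMMAS AND PROOFS =====

def pvFmax (b : Int) (L : List Int) : Int := L.foldl max b

theorem pvFmax_append (b : Int) (L1 L2 : List Int) :
    pvFmax b (L1 ++ L2) = pvFmax (pvFmax b L1) L2 := by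
  simp [pvFmax, List.foldl_append]

theorem pvFmax_le_iff {b x : Int} {L : List Int} :
    pvFmax b L ≤ x ↔ b ≤ x ∧ ∀ a ∈ L, a ≤ x := by
  induction L generalizing b with
  | nil => simp [pvFmax]
  | cons h t ih =>
    simp only [pvFmax, List.foldl_cons] at *
    rw [ih]
    constructor
    · rintro ⟨hb, ht⟩
      exact ⟨by omega, by intro a ha; rcases List.mem_cons.1 ha with rfl | ha; omega; exact ht a ha⟩
    · rintro ⟨hb, ht⟩
      exact ⟨by have := ht h (by simp); omega, fun a ha => ht a (by simp [ha])⟩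

theorem le_pvFmax_base (b : Int) (L : List Int) : b ≤ pvFmax b L := by
  induction L generalizing b with
  | nil => simp [pvFmax]
  | cons h t ih => simp only [pvFmax, List.foldl_cons]; exact le_trans (le_max_left _ _) (ih (max b h))

theorem le_pvFmax_of_mem {a : Int} {L : List Int} (b : Int) (ha : a ∈ L) : a ≤ pvFmax b L := by
  induction L generalizing b with
  | nil => simp at ha
  | cons h t ih =>
    rcases List.mem_cons.1 ha with rfl | ha
    · exact le_trans (le_max_right b a) (le_pvFmax_base _ _)
    · exact ih (max b h) ha

theorem foldl_fmax_flatMap (f : Nat → List Int) (L : List Nat) (b : Int) :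
    L.foldl (fun acc i => pvFmax acc (f i)) b = pvFmax b (L.flatMap f) := by
  induction L generalizing b with
  | nil => simp [pvFmax]
  | cons h t ih => simp only [List.foldl_cons, List.flatMap_cons, pvFmax_append]; exact ih _
-- candidate lists
def pvCA (cs : List (Int × Int)) (i : Nat) : List Int :=
  let z := cs.getD i (0, 0)
  [z.1]
  ++ (if 0 < i ∨ i < cs.length - 1 then [z.1 + 1] else [])
  ++ (if 1 < i then
        let x := cs.getD (i - 2) (0, 0)
        let y := cs.getD (i - 1) (0, 0)
        if y.1 = 1 ∧ x.2 + y.2 = 2 * z.2 then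
          [z.1 + 2] ++
            (if 2 < i ∧ x.1 = 1 ∧ z.2 = (cs.getD (i - 3) (0, 0)).2 then
              [z.1 + 2 + (cs.getD (i - 3) (0, 0)).1] else [])
        else []
      else [])
  ++ (if i < cs.length - 2 then
        let a := cs.getD (i + 1) (0, 0)
        let b := cs.getD (i + 2) (0, 0)
        if a.1 = 1 ∧ a.2 + b.2 = 2 * z.2 then [z.1 + 2] else []
      else [])

def pvCRun (M : Nat) (l : List Int) (i : Nat) : Int :=
  l.getD i 0 + (if 0 ≤ (i : Int) - l.getD i 0 ∨ i + 1 < M then 1 else 0)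

def pvCBr (M : Nat) (D l r : List Int) (p : Nat) : List Int :=
  let s := D.getD p 0 + D.getD (p + 1) 0
  (if 1 ≤ p ∧ s = 2 * D.getD (p - 1) 0 then
    [if p + 2 < M ∧ D.getD (p + 2) 0 = D.getD (p - 1) 0 then
        l.getD (p - 1) 0 + 2 + r.getD (p + 2) 0
      else l.getD (p - 1) 0 + 2]
   else [])
  ++ (if p + 2 < M ∧ s = 2 * D.getD (p + 2) 0 then [2 + r.getD (p + 2) 0] else [])

theorem foldl_max_map (f : Nat → Int) (L : List Nat) (b : Int) :
    L.foldl (fun acc i => max acc (f i)) b = pvFmax b (L.map f) := by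
  induction L generalizing b with
  | nil => rfl
  | cons h t ih => simp only [List.foldl_cons, List.map_cons, pvFmax, List.foldl_cons]; exact ih _

theorem pvLoopA_eq (cs : List (Int × Int)) :
    pvLoopA cs = pvFmax 1 ((List.range cs.length).flatMap (pvCA cs)) := by
  rw [← foldl_fmax_flatMap]
  unfold pvLoopA
  congr 1
  funext best i
  simp only [pvCA]
  split_ifs <;> simp [pvFmax, max_assoc]

theorem pvRunFold_eq (M : Nat) (l : List Int) :
    pvRunFold M l = pvFmax 0 ((List.range M).map (pvCRun M l)) := by
  rw [← foldl_max_map]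
  rfl

theorem pvBridgeFold_eq (M : Nat) (D l r : List Int) (b0 : Int) :
    pvBridgeFold M D l r b0 = pvFmax b0 ((List.range (M - 1)).flatMap (pvCBr M D l r)) := by
  rw [← foldl_fmax_flatMap]
  unfold pvBridgeFold
  congr 1
  funext best p
  simp only [pvCBr]
  split_ifs <;> simp [pvFmax, max_assoc]

theorem pvCoreB_eq (M : Nat) (D l r : List Int) :
    pvBridgeFold M D l r (pvRunFold M l) =
      pvFmax 0 ((List.range M).map (pvCRun M l) ++ (List.range (M - 1)).flatMap (pvCBr M D l r)) := by
  rw [pvBridgeFold_eq, pvRunFold_eq, pvFmax_append]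
def pvFlat (cs : List (Int × Int)) : List Int := cs.flatMap (fun c => List.replicate c.1.toNat c.2)
def pvLramp (cs : List (Int × Int)) : List Int :=
  cs.flatMap (fun c => (List.range c.1.toNat).map (fun t : Nat => (t : Int) + 1))
def pvRramp (cs : List (Int × Int)) : List Int :=
  cs.flatMap (fun c => (List.range c.1.toNat).map (fun t : Nat => c.1 - (t : Int)))
def pvWf (cs : List (Int × Int)) : Prop :=
  (∀ c ∈ cs, 1 ≤ c.1) ∧ cs.IsChain (fun a b => a.2 ≠ b.2)
def pvS (cs : List (Int × Int)) : Nat := (cs.map (fun c => c.1.toNat)).sum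

theorem pvRle_ne_nil (d : Int) (rest : List Int) : pvRle (d :: rest) ≠ [] := by
  simp only [pvRle]
  rcases h : pvRle rest with _ | ⟨⟨k, d'⟩, tl⟩ <;> simp <;> split <;> simp

theorem pvRle_k_pos : ∀ (D : List Int) (c : Int × Int), c ∈ pvRle D → 1 ≤ c.1 := by
  intro D
  induction D with
  | nil => intro c hc; simp [pvRle] at hc
  | cons d rest ih =>
    intro c hc
    simp only [pvRle] at hc
    rcases h : pvRle rest with _ | ⟨⟨k, d'⟩, tl⟩ <;> rw [h] at hc
    · simp at hc; subst hc; norm_num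
    · have hk : 1 ≤ k := ih (k, d') (by rw [h]; simp)
      by_cases hd : d = d' <;> simp [hd] at hc
      · rcases hc with hc | hc
        · subst hc; simp; omega
        · exact ih c (by rw [h]; simp [hc])
      · rcases hc with hc | hc | hc
        · subst hc; norm_num
        · subst hc; exact hk
        · exact ih c (by rw [h]; simp [hc])

theorem pvRle_chain : ∀ (D : List Int), (pvRle D).IsChain (fun a b => a.2 ≠ b.2) := by
  intro D
  induction D with
  | nil => simp [pvRle]
  | cons d rest ih =>
    simp only [pvRle]
    rcases h : pvRle rest with _ | ⟨⟨k, d'⟩, tl⟩ <;> rw [h] at ih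
    · simp [List.isChain_cons]
    · by_cases hd : d = d'
      · subst hd
        simp only [if_true]
        rw [List.isChain_cons] at ih ⊢
        exact ih
      · simp only [if_neg hd]
        rw [List.isChain_cons]
        exact ⟨by intro y hy; simp at hy; rw [← hy]; simpa using hd, ih⟩

theorem pvRle_flat : ∀ (D : List Int), pvFlat (pvRle D) = D := by
  intro D
  induction D with
  | nil => simp [pvRle, pvFlat]
  | cons d rest ih =>
    simp only [pvRle]
    rcases h : pvRle rest with _ | ⟨⟨k, d'⟩, tl⟩ <;> rw [h] at ih
    · have : rest = [] := by
        rcases rest with _ | ⟨d2, r2⟩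
        · rfl
        · exact absurd h (pvRle_ne_nil d2 r2)
      subst this; simp [pvFlat]
    · have hk : 1 ≤ k := pvRle_k_pos rest (k, d') (by rw [h]; simp)
      have hd'head : ∃ t, List.replicate k.toNat d' = d' :: t := by
        rcases hkn : k.toNat with _ | m
        · omega
        · exact ⟨List.replicate m d', rfl⟩
      by_cases hd : d = d' <;> simp only [hd, if_true, if_false, reduceIte]
      · subst hd
        simp only [pvFlat, List.flatMap_cons] at ih ⊢
        have : (k + 1).toNat = k.toNat + 1 := by omega
        rw [this, List.replicate_succ]
        simp [ih]
      · simp only [pvFlat, List.flatMap_cons] at ih ⊢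
        simp [ih]
theorem pvS_cons (c : Int × Int) (cs : List (Int × Int)) :
    pvS (c :: cs) = c.1.toNat + pvS cs := by
  simp [pvS]

theorem pvS_append (l1 l2 : List (Int × Int)) : pvS (l1 ++ l2) = pvS l1 + pvS l2 := by
  simp [pvS]

theorem pvLen_blocks (g : (Int × Int) → List Int) (hg : ∀ c, (g c).length = c.1.toNat) :
    ∀ cs : List (Int × Int), (cs.flatMap g).length = pvS cs := by
  intro cs
  rw [List.length_flatMap, pvS]
  congr 1
  exact List.map_congr_left (fun c _ => hg c)

theorem pvFlat_length (cs : List (Int × Int)) : (pvFlat cs).length = pvS cs :=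
  pvLen_blocks _ (fun c => List.length_replicate) cs

theorem pvRramp_length (cs : List (Int × Int)) : (pvRramp cs).length = pvS cs :=
  pvLen_blocks _ (fun c => by simp) cs

theorem pvS_ge_length (cs : List (Int × Int)) (h : ∀ c ∈ cs, 1 ≤ c.1) :
    cs.length ≤ pvS cs := by
  induction cs with
  | nil => simp [pvS]
  | cons c cs ih =>
    have h1 : 1 ≤ c.1 := h c (by simp)
    have := ih (fun c' hc' => h c' (by simp [hc']))
    simp only [pvS, List.map_cons, List.sum_cons, List.length_cons] at *
    omega

theorem getD_blocks (g : (Int × Int) → List Int) (hg : ∀ c, (g c).length = c.1.toNat)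
    (pre : List (Int × Int)) (c : Int × Int) (suf : List (Int × Int)) (t : Nat)
    (ht : t < c.1.toNat) :
    ((pre ++ c :: suf).flatMap g).getD (pvS pre + t) 0 = (g c).getD t 0 := by
  rw [List.flatMap_append, List.flatMap_cons,
    List.getD_append_right _ _ _ _ (by rw [pvLen_blocks g hg]; omega),
    pvLen_blocks g hg, Nat.add_sub_cancel_left, List.getD_append _ _ _ _ (by rw [hg]; omega)]

-- value of D at chunk c, offset t
theorem pvD_at (pre : List (Int × Int)) (c : Int × Int) (suf : List (Int × Int)) (t : Nat)
    (ht : t < c.1.toNat) :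
    (pvFlat (pre ++ c :: suf)).getD (pvS pre + t) 0 = c.2 := by
  rw [pvFlat, getD_blocks _ (fun c => List.length_replicate) pre c suf t ht]
  exact List.getD_replicate _ ht

theorem pvL_at (pre : List (Int × Int)) (c : Int × Int) (suf : List (Int × Int)) (t : Nat)
    (ht : t < c.1.toNat) :
    (pvLramp (pre ++ c :: suf)).getD (pvS pre + t) 0 = (t : Int) + 1 := by
  rw [pvLramp, getD_blocks _ (fun c => by simp) pre c suf t ht,
    PySem.List.getD_map_range _ _ _ _ ht]

theorem pvR_at (pre : List (Int × Int)) (c : Int × Int) (suf : List (Int × Int)) (t : Nat)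
    (ht : t < c.1.toNat) :
    (pvRramp (pre ++ c :: suf)).getD (pvS pre + t) 0 = c.1 - (t : Int) := by
  rw [pvRramp, getD_blocks _ (fun c => by simp) pre c suf t ht,
    PySem.List.getD_map_range _ _ _ _ ht]

theorem pos_decomp : ∀ (cs : List (Int × Int)) (p : Nat), p < pvS cs →
    ∃ pre c suf t, cs = pre ++ c :: suf ∧ t < c.1.toNat ∧ p = pvS pre + t := by
  intro cs
  induction cs with
  | nil => intro p hp; simp [pvS] at hp
  | cons c cs ih =>
    intro p hp
    by_cases h : p < c.1.toNat
    · exact ⟨[], c, cs, p, by simp, h, by simp [pvS]⟩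
    · have hp' : p - c.1.toNat < pvS cs := by
        rw [pvS_cons] at hp; omega
      obtain ⟨pre, c', suf, t, hdec, ht, hpt⟩ := ih (p - c.1.toNat) hp'
      exact ⟨c :: pre, c', suf, t, by simp [hdec], ht, by rw [pvS_cons]; omega⟩
theorem pvLvalsGo_replicate (rest : List Int) :
    ∀ (m : Nat) (d c : Int),
      pvLvalsGo d c (List.replicate m d ++ rest) =
        (List.range m).map (fun t : Nat => c + (t : Int) + 1) ++ pvLvalsGo d (c + m) rest := by
  intro m
  induction m with
  | zero => intro d c; simp
  | succ m ih =>
    intro d c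
    rw [List.replicate_succ, List.cons_append]
    simp only [pvLvalsGo, eq_self_iff_true, if_true]
    rw [ih d (c + 1), List.range_succ_eq_map]
    simp only [List.map_cons, List.map_map, List.cons_append, List.cons.injEq]
    refine ⟨by push_cast; ring, ?_⟩
    congr 1
    · apply List.map_congr_left
      intro t _
      simp [Function.comp, Nat.succ_eq_add_one]
      try push_cast
      try ring
    · congr 1
      push_cast
      ring

theorem pvLvals_chunk (k : Nat) (d : Int) (rest : List Int) (hk : 1 ≤ k)
    (hhead : ∀ d', rest.head? = some d' → d' ≠ d) :
    pvLvals (List.replicate k d ++ rest) =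
      (List.range k).map (fun t : Nat => (t : Int) + 1) ++ pvLvals rest := by
  obtain ⟨m, rfl⟩ : ∃ m, k = m + 1 := ⟨k - 1, by omega⟩
  rw [List.replicate_succ, List.cons_append]
  simp only [pvLvals]
  rw [pvLvalsGo_replicate rest m d 1]
  have hgo : pvLvalsGo d (1 + m) rest = pvLvals rest := by
    rcases rest with _ | ⟨d', tail⟩
    · simp [pvLvalsGo, pvLvals]
    · have : d' ≠ d := hhead d' rfl
      simp [pvLvalsGo, pvLvals, this]
  rw [hgo, List.range_succ_eq_map]
  simp only [List.map_cons, List.map_map, List.cons_append, List.cons.injEq]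
  refine ⟨by norm_num, ?_⟩
  congr 1
  apply List.map_congr_left
  intro t _
  simp [Function.comp, Nat.succ_eq_add_one]
  push_cast
  ring

theorem pvFlat_head (c : Int × Int) (cs : List (Int × Int)) (hk : 1 ≤ c.1) :
    (pvFlat (c :: cs)).head? = some c.2 := by
  have : ∃ m, c.1.toNat = m + 1 := ⟨c.1.toNat - 1, by omega⟩
  obtain ⟨m, hm⟩ := this
  simp [pvFlat, hm, List.replicate_succ]

theorem pvLvals_flat : ∀ (cs : List (Int × Int)), pvWf cs → pvLvals (pvFlat cs) = pvLramp cs := by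
  intro cs
  induction cs with
  | nil => intro _; simp [pvFlat, pvLramp, pvLvals]
  | cons c cs ih =>
    intro hwf
    obtain ⟨hks, hchain⟩ := hwf
    have hk : 1 ≤ c.1 := hks c (by simp)
    have hwf' : pvWf cs := ⟨fun c' hc' => hks c' (by simp [hc']), (List.isChain_cons.1 hchain).2⟩
    have hhead : ∀ d', (pvFlat cs).head? = some d' → d' ≠ c.2 := by
      intro d' hd'
      rcases cs with _ | ⟨c', cs'⟩
      · simp [pvFlat] at hd'
      · rw [pvFlat_head c' cs' (hwf'.1 c' (by simp))] at hd'
        have := (List.isChain_cons.1 hchain).1 c' (by simp)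
        simp at hd'
        rw [← hd']
        exact Ne.symm this
    show pvLvals (List.replicate c.1.toNat c.2 ++ pvFlat cs) = _
    rw [pvLvals_chunk c.1.toNat c.2 (pvFlat cs) (by omega) hhead, ih hwf']
    rfl

theorem pvRvals_chunk : ∀ (k : Nat) (d : Int) (rest : List Int),
    (∀ d', rest.head? = some d' → d' ≠ d) →
    pvRvals (List.replicate k d ++ rest) =
      (List.range k).map (fun t : Nat => (k : Int) - (t : Int)) ++ pvRvals rest := by
  intro k
  induction k with
  | zero => intro d rest _; simp
  | succ m ih =>
    intro d rest hhead
    rcases Nat.eq_zero_or_pos m with hm | hm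
    · subst hm
      simp only [List.replicate_succ, List.replicate_zero, List.nil_append, List.cons_append,
        List.range_one, List.map_cons, List.map_nil]
      rcases rest with _ | ⟨d', tail⟩
      · simp [pvRvals]
      · have : d' ≠ d := hhead d' rfl
        simp [pvRvals, this.symm]
    · have hrep : List.replicate (m + 1) d ++ rest = d :: (List.replicate m d ++ rest) := by
        rw [List.replicate_succ, List.cons_append]
      have hrep2 : List.replicate m d ++ rest = d :: (List.replicate (m - 1) d ++ rest) := by
        conv_lhs => rw [show m = (m - 1) + 1 by omega, List.replicate_succ, List.cons_append]
      rw [hrep, hrep2]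
      simp only [pvRvals, eq_self_iff_true, if_true]
      rw [← hrep2, ih d rest hhead]
      have hhd : (((List.range m).map (fun t : Nat => (m : Int) - (t : Int)) ++ pvRvals rest).headD 0) = (m : Int) := by
        obtain ⟨m', hm'⟩ : ∃ m', m = m' + 1 := ⟨m - 1, by omega⟩
        simp [hm', List.range_succ_eq_map]
      rw [hhd, List.range_succ_eq_map]
      simp only [List.map_cons, List.map_map, List.cons_append, List.cons.injEq]
      refine ⟨by push_cast; ring, ?_⟩
      congr 1
      apply List.map_congr_left
      intro t _
      simp [Function.comp, Nat.succ_eq_add_one]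
      try push_cast
      try ring

theorem pvRvals_flat : ∀ (cs : List (Int × Int)), pvWf cs → pvRvals (pvFlat cs) = pvRramp cs := by
  intro cs
  induction cs with
  | nil => intro _; simp [pvFlat, pvRramp, pvRvals]
  | cons c cs ih =>
    intro hwf
    obtain ⟨hks, hchain⟩ := hwf
    have hk : 1 ≤ c.1 := hks c (by simp)
    have hwf' : pvWf cs := ⟨fun c' hc' => hks c' (by simp [hc']), (List.isChain_cons.1 hchain).2⟩
    have hhead : ∀ d', (pvFlat cs).head? = some d' → d' ≠ c.2 := by
      intro d' hd'
      rcases cs with _ | ⟨c', cs'⟩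
      · simp [pvFlat] at hd'
      · rw [pvFlat_head c' cs' (hwf'.1 c' (by simp))] at hd'
        have := (List.isChain_cons.1 hchain).1 c' (by simp)
        simp at hd'
        rw [← hd']
        exact Ne.symm this
    show pvRvals (List.replicate c.1.toNat c.2 ++ pvFlat cs) = _
    rw [pvRvals_chunk c.1.toNat c.2 (pvFlat cs) hhead, ih hwf']
    show _ = (List.range c.1.toNat).map (fun t : Nat => c.1 - (t : Int)) ++ pvRramp cs
    congr 1
    apply List.map_congr_left
    intro t _
    congr 1
    omega
def pvCAlist (cs : List (Int × Int)) : List Int := (List.range cs.length).flatMap (pvCA cs)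
def pvCBlist (cs : List (Int × Int)) : List Int :=
  (List.range (pvS cs)).map (pvCRun (pvS cs) (pvLramp cs)) ++
    (List.range (pvS cs - 1)).flatMap (pvCBr (pvS cs) (pvFlat cs) (pvLramp cs) (pvRramp cs))

theorem pvS_concat (l : List (Int × Int)) (c : Int × Int) :
    pvS (l ++ [c]) = pvS l + c.1.toNat := by
  simp [pvS]

theorem pvS_decomp (pre : List (Int × Int)) (c : Int × Int) (suf : List (Int × Int)) :
    pvS (pre ++ c :: suf) = pvS pre + c.1.toNat + pvS suf := by
  rw [pvS_append, pvS_cons]; omega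

theorem getD_decomp (pre : List (Int × Int)) (c : Int × Int) (suf : List (Int × Int))
    (j : Nat) (v : Int × Int) :
    (pre ++ c :: suf).getD (pre.length + j) v = (c :: suf).getD j v := by
  rw [List.getD_append_right _ _ _ _ (by omega), Nat.add_sub_cancel_left]

theorem wf_sub (cs pre suf : List (Int × Int)) (c : Int × Int) (hwf : pvWf cs)
    (hdec : cs = pre ++ c :: suf) : 1 ≤ c.1 :=
  hwf.1 c (by rw [hdec]; simp)

theorem wf_adj (cs l1 l2 : List (Int × Int)) (a b : Int × Int) (hwf : pvWf cs)
    (hdec : cs = l1 ++ a :: b :: l2) : a.2 ≠ b.2 := by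
  have := hwf.2
  rw [hdec, List.isChain_append] at this
  exact (List.isChain_cons.1 this.2.1).1 b rfl

theorem rramp_getD_nonneg (cs : List (Int × Int)) (hwf : pvWf cs) (q : Nat) :
    0 ≤ (pvRramp cs).getD q 0 := by
  by_cases hq : q < pvS cs
  · obtain ⟨pre, c, suf, t, hdec, ht, hqt⟩ := pos_decomp cs q hq
    subst hdec
    rw [hqt, pvR_at pre c suf t ht]
    have := wf_sub _ pre suf c hwf rfl
    omega
  · rw [List.getD_eq_getElem?_getD, List.getElem?_eq_none (by rw [pvRramp_length]; omega)]
    simp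

theorem acand_le (cs : List (Int × Int)) (j : Nat) (a : Int) (hj : j < cs.length)
    (ha : a ∈ pvCA cs j) : a ≤ pvFmax 1 (pvCAlist cs) :=
  le_pvFmax_of_mem _ (List.mem_flatMap.2 ⟨j, List.mem_range.2 hj, ha⟩)

theorem runcand_le (cs : List (Int × Int)) (p : Nat) (hp : p < pvS cs) :
    pvCRun (pvS cs) (pvLramp cs) p ≤ pvFmax 0 (pvCBlist cs) :=
  le_pvFmax_of_mem _ (List.mem_append_left _ (List.mem_map.2 ⟨p, List.mem_range.2 hp, rfl⟩))

theorem brcand_le (cs : List (Int × Int)) (p : Nat) (a : Int) (hp : p < pvS cs - 1)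
    (ha : a ∈ pvCBr (pvS cs) (pvFlat cs) (pvLramp cs) (pvRramp cs) p) :
    a ≤ pvFmax 0 (pvCBlist cs) :=
  le_pvFmax_of_mem _ (List.mem_append_right _ (List.mem_flatMap.2 ⟨p, List.mem_range.2 hp, ha⟩))

-- members of the A candidate list
theorem memA_base (cs : List (Int × Int)) (j : Nat) :
    (cs.getD j (0, 0)).1 ∈ pvCA cs j := by
  simp only [pvCA, List.mem_append, List.mem_singleton]
  tauto

theorem memA_ext (cs : List (Int × Int)) (j : Nat) (h : 0 < j ∨ j < cs.length - 1) :
    (cs.getD j (0, 0)).1 + 1 ∈ pvCA cs j := by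
  simp only [pvCA, List.mem_append, List.mem_singleton, List.mem_ite_nil_right]
  tauto

theorem memA_L (cs : List (Int × Int)) (j : Nat) (h1 : 1 < j)
    (h2 : (cs.getD (j - 1) (0, 0)).1 = 1)
    (h3 : (cs.getD (j - 2) (0, 0)).2 + (cs.getD (j - 1) (0, 0)).2 = 2 * (cs.getD j (0, 0)).2) :
    (cs.getD j (0, 0)).1 + 2 ∈ pvCA cs j := by
  simp only [pvCA, List.mem_append, List.mem_singleton, List.mem_ite_nil_right]
  tauto

theorem memA_L4 (cs : List (Int × Int)) (j : Nat) (h1 : 1 < j)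
    (h2 : (cs.getD (j - 1) (0, 0)).1 = 1)
    (h3 : (cs.getD (j - 2) (0, 0)).2 + (cs.getD (j - 1) (0, 0)).2 = 2 * (cs.getD j (0, 0)).2)
    (h4 : 2 < j) (h5 : (cs.getD (j - 2) (0, 0)).1 = 1)
    (h6 : (cs.getD j (0, 0)).2 = (cs.getD (j - 3) (0, 0)).2) :
    (cs.getD j (0, 0)).1 + 2 + (cs.getD (j - 3) (0, 0)).1 ∈ pvCA cs j := by
  simp only [pvCA, List.mem_append, List.mem_singleton, List.mem_ite_nil_right]
  tauto

theorem memA_R (cs : List (Int × Int)) (j : Nat) (h1 : j < cs.length - 2)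
    (h2 : (cs.getD (j + 1) (0, 0)).1 = 1)
    (h3 : (cs.getD (j + 1) (0, 0)).2 + (cs.getD (j + 2) (0, 0)).2 = 2 * (cs.getD j (0, 0)).2) :
    (cs.getD j (0, 0)).1 + 2 ∈ pvCA cs j := by
  simp only [pvCA, List.mem_append, List.mem_singleton, List.mem_ite_nil_right]
  tauto
theorem decomp1 (cs : List (Int × Int)) (j : Nat) (h : j < cs.length) :
    cs = cs.take j ++ cs.getD j (0, 0) :: cs.drop (j + 1) := by
  rw [List.getD_eq_getElem _ _ h, List.getElem_cons_drop, List.take_append_drop]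

theorem drop_peel (cs : List (Int × Int)) (j : Nat) (h : j < cs.length) :
    cs.drop j = cs.getD j (0, 0) :: cs.drop (j + 1) := by
  rw [List.getD_eq_getElem _ _ h, List.drop_eq_getElem_cons]

theorem decomp3 (cs : List (Int × Int)) (j : Nat) (h : j + 2 < cs.length) :
    cs = cs.take j ++ cs.getD j (0, 0) :: cs.getD (j + 1) (0, 0) :: cs.getD (j + 2) (0, 0) ::
      cs.drop (j + 3) := by
  conv_lhs => rw [← List.take_append_drop j cs]
  rw [drop_peel cs j (by omega), drop_peel cs (j + 1) (by omega), drop_peel cs (j + 2) (by omega)]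

theorem decomp4 (cs : List (Int × Int)) (j : Nat) (h : j + 3 < cs.length) :
    cs = cs.take j ++ cs.getD j (0, 0) :: cs.getD (j + 1) (0, 0) :: cs.getD (j + 2) (0, 0) ::
      cs.getD (j + 3) (0, 0) :: cs.drop (j + 4) := by
  conv_lhs => rw [← List.take_append_drop j cs]
  rw [drop_peel cs j (by omega), drop_peel cs (j + 1) (by omega), drop_peel cs (j + 2) (by omega),
    drop_peel cs (j + 3) (by omega)]

theorem wf_take (cs : List (Int × Int)) (hwf : pvWf cs) (j : Nat) :
    ∀ c ∈ cs.take j, 1 ≤ c.1 := fun c hc => hwf.1 c (List.take_subset _ _ hc)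

theorem wf_drop (cs : List (Int × Int)) (hwf : pvWf cs) (j : Nat) :
    ∀ c ∈ cs.drop j, 1 ≤ c.1 := fun c hc => hwf.1 c (List.drop_subset _ _ hc)

theorem pv_dir1 (cs : List (Int × Int)) (hwf : pvWf cs) (hne : cs ≠ []) :
    pvFmax 1 (pvCAlist cs) ≤ pvFmax 0 (pvCBlist cs) := by
  have hS1 : 1 ≤ pvS cs := by
    have h1 : 1 ≤ cs.length := by
      rcases cs with _ | ⟨c, cs'⟩
      · exact absurd rfl hne
      · simp
    have := pvS_ge_length cs hwf.1
    omega
  -- generic: the run candidate at the LAST position of chunk j bounds z.1 (+1 when possible)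
  have hrun : ∀ (j : Nat), j < cs.length → (cs.getD j (0, 0)).1 ≤ pvFmax 0 (pvCBlist cs) := by
    intro j hj
    have hdec := decomp1 cs j hj
    set pre := cs.take j with hpre
    set z := cs.getD j (0, 0) with hz
    set suf := cs.drop (j + 1) with hsuf
    have hk : 1 ≤ z.1 := wf_sub cs pre suf z hwf hdec
    have hkcast : (z.1.toNat : Int) = z.1 := by omega
    have htlt : z.1.toNat - 1 < z.1.toNat := by omega
    have hScs : pvS cs = pvS pre + z.1.toNat + pvS suf := by rw [hdec, pvS_decomp]
    have hp : pvS pre + (z.1.toNat - 1) < pvS cs := by omega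
    have hl : (pvLramp cs).getD (pvS pre + (z.1.toNat - 1)) 0 = ((z.1.toNat - 1 : Nat) : Int) + 1 := by
      conv_lhs => rw [hdec]
      exact pvL_at pre z suf _ htlt
    have hlv : (pvLramp cs).getD (pvS pre + (z.1.toNat - 1)) 0 = z.1 := by rw [hl]; omega
    refine le_trans ?_ (runcand_le cs _ hp)
    unfold pvCRun
    rw [hlv]
    split_ifs <;> omega
  have hbase : (1 : Int) ≤ pvFmax 0 (pvCBlist cs) := by
    have hlen : 0 < cs.length := List.length_pos_of_ne_nil hne
    have hgd : cs.getD 0 (0, 0) = cs[0] := List.getD_eq_getElem _ _ hlen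
    have hk : 1 ≤ (cs.getD 0 (0, 0)).1 := by
      rw [hgd]; exact hwf.1 _ (List.getElem_mem hlen)
    have := hrun 0 hlen
    omega
  rw [pvFmax_le_iff]
  refine ⟨hbase, ?_⟩
  intro a ha
  obtain ⟨j, hjr, haj⟩ := List.mem_flatMap.1 ha
  rw [List.mem_range] at hjr
  simp only [pvCA, List.mem_append, List.mem_singleton, List.mem_ite_nil_right] at haj
  rcases haj with ((h | h) | h) | h
  · -- a = z.1
    subst h; exact hrun j hjr
  · -- extension candidate a = z.1 + 1
    obtain ⟨hcond, rfl⟩ := h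
    have hdec := decomp1 cs j hjr
    set pre := cs.take j with hpre
    set z := cs.getD j (0, 0) with hz
    set suf := cs.drop (j + 1) with hsuf
    have hk : 1 ≤ z.1 := wf_sub cs pre suf z hwf hdec
    have htlt : z.1.toNat - 1 < z.1.toNat := by omega
    have hScs : pvS cs = pvS pre + z.1.toNat + pvS suf := by rw [hdec, pvS_decomp]
    have hp : pvS pre + (z.1.toNat - 1) < pvS cs := by omega
    have hl : (pvLramp cs).getD (pvS pre + (z.1.toNat - 1)) 0 = ((z.1.toNat - 1 : Nat) : Int) + 1 := by
      conv_lhs => rw [hdec]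
      exact pvL_at pre z suf _ htlt
    have hlv : (pvLramp cs).getD (pvS pre + (z.1.toNat - 1)) 0 = z.1 := by rw [hl]; omega
    have hext : 0 ≤ ((pvS pre + (z.1.toNat - 1) : Nat) : Int) - z.1 ∨
        pvS pre + (z.1.toNat - 1) + 1 < pvS cs := by
      rcases hcond with h0 | h0
      · left
        have hprelen : pre.length = j := by rw [hpre]; simp [List.length_take]; omega
        have : 1 ≤ pvS pre := by
          have := pvS_ge_length pre (wf_take cs hwf j)
          omega
        push_cast
        omega
      · right
        have hsuflen : suf.length = cs.length - (j + 1) := by rw [hsuf]; simp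
        have : 1 ≤ pvS suf := by
          have h1 : 1 ≤ suf.length := by omega
          have := pvS_ge_length suf (wf_drop cs hwf (j + 1))
          omega
        omega
    refine le_trans ?_ (runcand_le cs _ hp)
    unfold pvCRun
    rw [hlv, if_pos hext]
    
  · -- left-rule candidates
    obtain ⟨h2, ⟨hy1, hsum⟩, hin⟩ := h
    obtain ⟨j', rfl⟩ : ∃ j', j = j' + 2 := ⟨j - 2, by omega⟩
    rw [show j' + 2 - 2 = j' from by omega] at hsum hin
    rw [show j' + 2 - 1 = j' + 1 from by omega] at hy1 hsum
    have hdec := decomp3 cs j' hjr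
    set pre := cs.take j' with hpre
    set x := cs.getD j' (0, 0) with hx
    set y := cs.getD (j' + 1) (0, 0) with hy
    set z := cs.getD (j' + 2) (0, 0) with hz
    set suf := cs.drop (j' + 3) with hsuf
    have hkx : 1 ≤ x.1 := wf_sub cs pre (y :: z :: suf) x hwf hdec
    have hkz : 1 ≤ z.1 := hwf.1 z (by rw [hdec]; simp)
    have hky : y.1 = 1 := hy1
    have hassoc1 : (pre ++ [x]) ++ y :: z :: suf = cs := by rw [hdec]; simp
    have hassoc2 : ((pre ++ [x]) ++ [y]) ++ z :: suf = cs := by rw [hdec]; simp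
    set p := pvS pre + (x.1.toNat - 1) with hp
    have harith1 : p + 1 = pvS (pre ++ [x]) + 0 := by rw [pvS_concat]; omega
    have harith2 : p + 2 = pvS ((pre ++ [x]) ++ [y]) + 0 := by
      rw [pvS_concat, pvS_concat]; omega
    have hD0 : (pvFlat cs).getD p 0 = x.2 := by
      conv_lhs => rw [hdec]
      exact pvD_at pre x (y :: z :: suf) _ (by omega)
    have hD1 : (pvFlat cs).getD (p + 1) 0 = y.2 := by
      rw [harith1, ← hassoc1]
      exact pvD_at (pre ++ [x]) y (z :: suf) 0 (by omega)
    have hD2 : (pvFlat cs).getD (p + 2) 0 = z.2 := by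
      rw [harith2, ← hassoc2]
      exact pvD_at ((pre ++ [x]) ++ [y]) z suf 0 (by omega)
    have hR2 : (pvRramp cs).getD (p + 2) 0 = z.1 := by
      rw [harith2, ← hassoc2]
      have := pvR_at ((pre ++ [x]) ++ [y]) z suf 0 (by omega)
      rw [this]; omega
    have hScs : pvS cs = pvS pre + x.1.toNat + 1 + z.1.toNat + pvS suf := by
      rw [hdec, pvS_decomp, pvS_cons, pvS_cons]
      omega
    have hp2 : p + 2 < pvS cs := by omega
    have hplt : p < pvS cs - 1 := by omega
    have hmem3 : (2 + (pvRramp cs).getD (p + 2) 0) ∈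
        pvCBr (pvS cs) (pvFlat cs) (pvLramp cs) (pvRramp cs) p := by
      simp only [pvCBr, List.mem_append, List.mem_singleton, List.mem_ite_nil_right]
      right
      refine ⟨⟨hp2, ?_⟩, trivial⟩
      rw [hD0, hD1, hD2]
      exact hsum
    rcases hin with rfl | ⟨⟨h3, hx1, hzw⟩, rfl⟩
    · -- a = z.1 + 2  (left rule)
      have := brcand_le cs p _ hplt hmem3
      rw [hR2] at this
      omega
    · -- a = z.1 + 2 + w.1  (four-chunk rule)
      rw [show j' + 2 - 3 = j' - 1 from by omega] at hzw ⊢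
      obtain ⟨j'', rfl⟩ : ∃ j'', j' = j'' + 1 := ⟨j' - 1, by omega⟩
      rw [show j'' + 1 - 1 = j'' from by omega] at hzw ⊢
      -- chunk w = cs[j''], pre = take (j''+1) = take j'' ++ [w]
      have hdecw := decomp4 cs j'' (by omega)
      set pre' := cs.take j'' with hpre'
      set w := cs.getD j'' (0, 0) with hw
      have hprew : pre = pre' ++ [w] := by
        rw [hpre, hpre', hw, List.getD_eq_getElem _ _ (show j'' < cs.length by omega),
          List.take_add_one, List.getElem?_eq_getElem (show j'' < cs.length by omega)]
        simp
      have hkw : 1 ≤ w.1 := hwf.1 w (by rw [hdecw]; simp)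
      have hx1' : x.1 = 1 := hx1
      -- p = pvS pre' + w.k (x's single diff);  p - 1 = last diff of w
      have hparith : p = pvS pre' + w.1.toNat := by
        rw [hp, hprew, pvS_concat]; omega
      have hassocw : pre' ++ w :: (x :: y :: z :: suf) = cs := by
        rw [hprew] at hdec; rw [hdec]; simp
      have hDm1 : (pvFlat cs).getD (p - 1) 0 = w.2 := by
        rw [show p - 1 = pvS pre' + (w.1.toNat - 1) from by omega, ← hassocw]
        exact pvD_at pre' w (x :: y :: z :: suf) _ (by omega)
      have hLm1 : (pvLramp cs).getD (p - 1) 0 = w.1 := by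
        rw [show p - 1 = pvS pre' + (w.1.toNat - 1) from by omega, ← hassocw]
        have := pvL_at pre' w (x :: y :: z :: suf) _ (by omega : w.1.toNat - 1 < w.1.toNat)
        rw [this]; omega
      have hp1 : 1 ≤ p := by omega
      have hmem2 : ((pvLramp cs).getD (p - 1) 0 + 2 + (pvRramp cs).getD (p + 2) 0) ∈
          pvCBr (pvS cs) (pvFlat cs) (pvLramp cs) (pvRramp cs) p := by
        simp only [pvCBr, List.mem_append, List.mem_singleton, List.mem_ite_nil_right]
        left
        refine ⟨⟨hp1, ?_⟩, ?_⟩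
        · rw [hD0, hD1, hDm1, hsum, hzw]
        · rw [if_pos ⟨hp2, by rw [hD2, hDm1, hzw]⟩]
      have := brcand_le cs p _ hplt hmem2
      rw [hLm1, hR2] at this
      omega
  · -- right-rule candidate a = z.1 + 2
    obtain ⟨h1, ⟨ha1, hsum⟩, rfl⟩ := h
    have hdec := decomp3 cs j (by omega)
    set pre := cs.take j with hpre
    set z := cs.getD j (0, 0) with hz
    set aa := cs.getD (j + 1) (0, 0) with haa
    set bb := cs.getD (j + 2) (0, 0) with hbb
    set suf := cs.drop (j + 3) with hsuf
    have hkz : 1 ≤ z.1 := wf_sub cs pre (aa :: bb :: suf) z hwf hdec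
    have hkb : 1 ≤ bb.1 := hwf.1 bb (by rw [hdec]; simp)
    set p := pvS pre + z.1.toNat with hp
    have hassoc1 : (pre ++ [z]) ++ aa :: bb :: suf = cs := by rw [hdec]; simp
    have hassoc2 : ((pre ++ [z]) ++ [aa]) ++ bb :: suf = cs := by rw [hdec]; simp
    have harith1 : p = pvS (pre ++ [z]) + 0 := by rw [pvS_concat]; omega
    have harith2 : p + 1 = pvS ((pre ++ [z]) ++ [aa]) + 0 := by
      rw [pvS_concat, pvS_concat]; omega
    have hDm1 : (pvFlat cs).getD (p - 1) 0 = z.2 := by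
      rw [show p - 1 = pvS pre + (z.1.toNat - 1) from by omega]
      conv_lhs => rw [hdec]
      exact pvD_at pre z (aa :: bb :: suf) _ (by omega)
    have hLm1 : (pvLramp cs).getD (p - 1) 0 = z.1 := by
      rw [show p - 1 = pvS pre + (z.1.toNat - 1) from by omega]
      conv_lhs => rw [hdec]
      have := pvL_at pre z (aa :: bb :: suf) _ (by omega : z.1.toNat - 1 < z.1.toNat)
      rw [this]; omega
    have hD0 : (pvFlat cs).getD p 0 = aa.2 := by
      rw [harith1, ← hassoc1]
      exact pvD_at (pre ++ [z]) aa (bb :: suf) 0 (by omega)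
    have hD1 : (pvFlat cs).getD (p + 1) 0 = bb.2 := by
      rw [harith2, ← hassoc2]
      exact pvD_at ((pre ++ [z]) ++ [aa]) bb suf 0 (by omega)
    have hScs : pvS cs = pvS pre + z.1.toNat + 1 + bb.1.toNat + pvS suf := by
      rw [hdec, pvS_decomp, pvS_cons, pvS_cons]
      omega
    have hplt : p < pvS cs - 1 := by omega
    have hp1 : 1 ≤ p := by omega
    set e2 := if p + 2 < pvS cs ∧ (pvFlat cs).getD (p + 2) 0 = (pvFlat cs).getD (p - 1) 0 then
        (pvLramp cs).getD (p - 1) 0 + 2 + (pvRramp cs).getD (p + 2) 0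
      else (pvLramp cs).getD (p - 1) 0 + 2 with he2
    have hmem2 : e2 ∈ pvCBr (pvS cs) (pvFlat cs) (pvLramp cs) (pvRramp cs) p := by
      simp only [pvCBr, List.mem_append, List.mem_singleton, List.mem_ite_nil_right]
      left
      refine ⟨⟨hp1, ?_⟩, rfl⟩
      rw [hD0, hD1, hDm1]
      exact hsum
    have hge : z.1 + 2 ≤ e2 := by
      rw [he2]
      have := rramp_getD_nonneg cs hwf (p + 2)
      split_ifs <;> rw [hLm1] <;> omega
    exact le_trans hge (brcand_le cs p _ hplt hmem2)
theorem pv_dir2 (cs : List (Int × Int)) (hwf : pvWf cs) (hne : cs ≠ []) :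
    pvFmax 0 (pvCBlist cs) ≤ pvFmax 1 (pvCAlist cs) := by
  rw [pvFmax_le_iff]
  refine ⟨le_trans (by norm_num) (le_pvFmax_base 1 _), ?_⟩
  intro a ha
  rcases List.mem_append.1 ha with hrun | hbr
  · -- run candidates
    obtain ⟨i, hir, rfl⟩ := List.mem_map.1 hrun
    rw [List.mem_range] at hir
    obtain ⟨pre, c, suf, t, hdec, ht, rfl⟩ := pos_decomp cs i hir
    have hk : 1 ≤ c.1 := wf_sub cs pre suf c hwf hdec
    have hkc : (c.1.toNat : Int) = c.1 := by omega
    have hl : (pvLramp cs).getD (pvS pre + t) 0 = (t : Int) + 1 := by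
      conv_lhs => rw [hdec]
      exact pvL_at pre c suf t ht
    have hlen : cs.length = pre.length + 1 + suf.length := by rw [hdec]; simp; omega
    have hgd : cs.getD pre.length (0, 0) = c := by
      rw [hdec]
      have := getD_decomp pre c suf 0 (0, 0)
      simpa using this
    have hScs : pvS cs = pvS pre + c.1.toNat + pvS suf := by rw [hdec, pvS_decomp]
    have hbound := acand_le cs pre.length _ (by omega) (memA_base cs pre.length)
    rw [hgd] at hbound
    unfold pvCRun
    rw [hl]
    by_cases hcond : 0 ≤ ((pvS pre + t : Nat) : Int) - ((t : Int) + 1) ∨ pvS pre + t + 1 < pvS cs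
    · rw [if_pos hcond]
      by_cases hpe : pre = []
      · by_cases hse : suf = []
        · -- single chunk: the extension needs a following position
          have hS0 : pvS pre = 0 := by rw [hpe]; rfl
          have hS0' : pvS suf = 0 := by rw [hse]; rfl
          rcases hcond with h0 | h0
          · exfalso; push_cast at h0; omega
          · have : t + 1 < c.1.toNat := by omega
            omega
        · have hext := acand_le cs pre.length _ (by omega) (memA_ext cs pre.length
            (by right
                have := List.length_pos_of_ne_nil hse
                omega))
          rw [hgd] at hext
          omega
      · have hext := acand_le cs pre.length _ (by omega) (memA_ext cs pre.length
          (by left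
              have := List.length_pos_of_ne_nil hpe
              omega))
        rw [hgd] at hext
        omega
    · rw [if_neg hcond]
      omega
  · -- bridge candidates
    obtain ⟨p, hpr, hap⟩ := List.mem_flatMap.1 hbr
    rw [List.mem_range] at hpr
    have hpS : p < pvS cs := by omega
    obtain ⟨pre, c, suf, t, hdec, ht, rfl⟩ := pos_decomp cs p hpS
    have hk : 1 ≤ c.1 := wf_sub cs pre suf c hwf hdec
    have hkc : (c.1.toNat : Int) = c.1 := by omega
    have hScs : pvS cs = pvS pre + c.1.toNat + pvS suf := by rw [hdec, pvS_decomp]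
    have hD0 : (pvFlat cs).getD (pvS pre + t) 0 = c.2 := by
      conv_lhs => rw [hdec]
      exact pvD_at pre c suf t ht
    have hlen : cs.length = pre.length + 1 + suf.length := by rw [hdec]; simp; omega
    have hgdc : cs.getD pre.length (0, 0) = c := by
      rw [hdec]
      have := getD_decomp pre c suf 0 (0, 0)
      simpa using this
    have hboundc := acand_le cs pre.length _ (by omega) (memA_base cs pre.length)
    rw [hgdc] at hboundc
    simp only [pvCBr, List.mem_append, List.mem_singleton, List.mem_ite_nil_right] at hap
    rcases Nat.lt_or_ge (t + 1) c.1.toNat with hin | hbd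
    · -- the pair D[p], D[p+1] lies inside chunk c
      have hD1 : (pvFlat cs).getD (pvS pre + t + 1) 0 = c.2 := by
        conv_lhs => rw [hdec, show pvS pre + t + 1 = pvS pre + (t + 1) from by omega]
        exact pvD_at pre c suf (t + 1) hin
      have hnotend : pvS pre + t + 2 < pvS cs →
          (pvFlat cs).getD (pvS pre + t + 2) 0 = c.2 → t + 2 < c.1.toNat := by
        intro h2 hval
        by_contra hge
        have ht2 : t + 2 = c.1.toNat := by omega
        rcases hss : suf with _ | ⟨c', suf'⟩
        · rw [hss] at hScs
          have hS0 : pvS ([] : List (Int × Int)) = 0 := rfl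
          omega
        · have hassoc : (pre ++ [c]) ++ c' :: suf' = cs := by rw [hdec, hss]; simp
          have hkc' : 1 ≤ c'.1 := hwf.1 c' (by rw [hdec, hss]; simp)
          have hv : (pvFlat cs).getD (pvS pre + t + 2) 0 = c'.2 := by
            rw [show pvS pre + t + 2 = pvS (pre ++ [c]) + 0 from by rw [pvS_concat]; omega,
              ← hassoc]
            exact pvD_at (pre ++ [c]) c' suf' 0 (by omega)
          have hadj : c.2 ≠ c'.2 := wf_adj cs pre suf' c c' hwf (by rw [hdec, hss])
          rw [hv] at hval
          exact hadj hval.symm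
      have hr2 : t + 2 < c.1.toNat →
          (pvRramp cs).getD (pvS pre + t + 2) 0 = c.1 - ((t : Int) + 2) := by
        intro h2
        conv_lhs => rw [hdec, show pvS pre + t + 2 = pvS pre + (t + 2) from by omega]
        rw [pvR_at pre c suf (t + 2) h2]
        push_cast; ring
      rcases hap with ⟨⟨hp1, hsum⟩, rfl⟩ | ⟨⟨hp2, hsum⟩, rfl⟩
      · -- b2 inside the chunk
        rw [hD0, hD1] at hsum
        have htpos : 1 ≤ t := by
          by_contra h0
          have ht0 : t = 0 := by omega
          subst ht0
          have hpre_ne : pre ≠ [] := by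
            intro h; rw [h] at hp1; simp [pvS] at hp1
          obtain ⟨pre', w, hprew⟩ : ∃ pre' w, pre = pre' ++ [w] := by
            rcases List.eq_nil_or_concat pre with h | ⟨pre', w, h⟩
            · exact absurd h hpre_ne
            · exact ⟨pre', w, by rw [h]; simp⟩
          have hkw : 1 ≤ w.1 := hwf.1 w (by rw [hdec, hprew]; simp)
          have hassoc : pre' ++ w :: c :: suf = cs := by rw [hdec, hprew]; simp
          have hDw : (pvFlat cs).getD (pvS pre + 0 - 1) 0 = w.2 := by
            rw [show pvS pre + 0 - 1 = pvS pre' + (w.1.toNat - 1) from by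
                rw [hprew, pvS_concat]; omega, ← hassoc]
            exact pvD_at pre' w (c :: suf) _ (by omega)
          have hadj : w.2 ≠ c.2 := wf_adj cs pre' suf w c hwf (by rw [hdec, hprew]; simp)
          rw [hDw] at hsum
          exact hadj (by omega)
        have hDm1 : (pvFlat cs).getD (pvS pre + t - 1) 0 = c.2 := by
          rw [show pvS pre + t - 1 = pvS pre + (t - 1) from by omega]
          conv_lhs => rw [hdec]
          exact pvD_at pre c suf (t - 1) (by omega)
        have hLm1 : (pvLramp cs).getD (pvS pre + t - 1) 0 = (t : Int) := by
          rw [show pvS pre + t - 1 = pvS pre + (t - 1) from by omega]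
          conv_lhs => rw [hdec]
          rw [pvL_at pre c suf (t - 1) (by omega)]
          omega
        by_cases hext : pvS pre + t + 2 < pvS cs ∧
            (pvFlat cs).getD (pvS pre + t + 2) 0 = (pvFlat cs).getD (pvS pre + t - 1) 0
        · rw [if_pos hext]
          have h2k : t + 2 < c.1.toNat := hnotend hext.1 (by rw [hext.2, hDm1])
          rw [hLm1, hr2 h2k]
          omega
        · rw [if_neg hext, hLm1]
          omega
      · -- b3 inside the chunk
        rw [hD0, hD1] at hsum
        have hDp2 : (pvFlat cs).getD (pvS pre + t + 2) 0 = c.2 := by omega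
        have h2k : t + 2 < c.1.toNat := hnotend hp2 hDp2
        rw [hr2 h2k]
        omega
    · -- the pair straddles the boundary between chunk c and the next chunk
      have htk : t + 1 = c.1.toNat := by omega
      have hsuf_ne : suf ≠ [] := by
        intro h
        rw [h] at hScs
        have hS0 : pvS ([] : List (Int × Int)) = 0 := rfl
        omega
      rcases hss : suf with _ | ⟨c', suf'⟩
      · exact absurd hss hsuf_ne
      subst hss
      have hkc' : 1 ≤ c'.1 := hwf.1 c' (by rw [hdec]; simp)
      have hassoc1 : (pre ++ [c]) ++ c' :: suf' = cs := by rw [hdec]; simp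
      have hD1 : (pvFlat cs).getD (pvS pre + t + 1) 0 = c'.2 := by
        rw [show pvS pre + t + 1 = pvS (pre ++ [c]) + 0 from by rw [pvS_concat]; omega,
          ← hassoc1]
        exact pvD_at (pre ++ [c]) c' suf' 0 (by omega)
      have hadj : c.2 ≠ c'.2 := wf_adj cs pre suf' c c' hwf hdec
      -- where D[p+2] lives: either inside c' (only if c'.k ≥ 2) or in the chunk after c'
      have hp2cases : pvS pre + t + 2 < pvS cs →
          (2 ≤ c'.1.toNat ∧ (pvFlat cs).getD (pvS pre + t + 2) 0 = c'.2) ∨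
          (c'.1.toNat = 1 ∧ ∃ cc suf'', suf' = cc :: suf'' ∧
            (pvFlat cs).getD (pvS pre + t + 2) 0 = cc.2 ∧
            (pvRramp cs).getD (pvS pre + t + 2) 0 = cc.1) := by
        intro h2
        rcases Nat.lt_or_ge 1 c'.1.toNat with hc2 | hc1
        · left
          refine ⟨hc2, ?_⟩
          rw [show pvS pre + t + 2 = pvS (pre ++ [c]) + 1 from by rw [pvS_concat]; omega,
            ← hassoc1]
          exact pvD_at (pre ++ [c]) c' suf' 1 hc2
        · right
          have hc1' : c'.1.toNat = 1 := by omega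
          have hSc' : pvS ((pre ++ [c]) ++ [c']) = pvS pre + t + 2 := by
            rw [pvS_concat, pvS_concat]; omega
          have hsuf'_ne : suf' ≠ [] := by
            intro h
            rw [hdec, h] at h2
            rw [show pvS (pre ++ c :: c' :: ([] : List (Int × Int))) =
                pvS ((pre ++ [c]) ++ [c']) from by simp [pvS]] at h2
            omega
          rcases hsc : suf' with _ | ⟨cc, suf''⟩
          · exact absurd hsc hsuf'_ne
          have hkcc : 1 ≤ cc.1 := hwf.1 cc (by rw [hdec, hsc]; simp)
          have hassoc2 : ((pre ++ [c]) ++ [c']) ++ cc :: suf'' = cs := by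
            rw [hdec, hsc]; simp
          refine ⟨hc1', cc, suf'', rfl, ?_, ?_⟩
          · rw [show pvS pre + t + 2 = pvS ((pre ++ [c]) ++ [c']) + 0 from by omega, ← hassoc2]
            exact pvD_at ((pre ++ [c]) ++ [c']) cc suf'' 0 (by omega)
          · rw [show pvS pre + t + 2 = pvS ((pre ++ [c]) ++ [c']) + 0 from by omega, ← hassoc2]
            rw [pvR_at ((pre ++ [c]) ++ [c']) cc suf'' 0 (by omega)]
            omega
      rcases hap with ⟨⟨hp1, hsum⟩, rfl⟩ | ⟨⟨hp2, hsum⟩, rfl⟩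
      · -- b2 at the boundary: forces c.k = 1 and an earlier chunk w
        rw [hD0, hD1] at hsum
        have ht0 : t = 0 := by
          by_contra h0
          have : (pvFlat cs).getD (pvS pre + t - 1) 0 = c.2 := by
            rw [show pvS pre + t - 1 = pvS pre + (t - 1) from by omega]
            conv_lhs => rw [hdec]
            exact pvD_at pre c (c' :: suf') (t - 1) (by omega)
          rw [this] at hsum
          exact hadj (by omega)
        subst ht0
        have hc1 : c.1 = 1 := by omega
        have hpre_ne : pre ≠ [] := by
          intro h; rw [h] at hp1; simp [pvS] at hp1
        obtain ⟨pre', w, hprew⟩ : ∃ pre' w, pre = pre' ++ [w] := by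
          rcases List.eq_nil_or_concat pre with h | ⟨pre', w, h⟩
          · exact absurd h hpre_ne
          · exact ⟨pre', w, by rw [h]; simp⟩
        have hkw : 1 ≤ w.1 := hwf.1 w (by rw [hdec, hprew]; simp)
        have hassocw : pre' ++ w :: c :: c' :: suf' = cs := by rw [hdec, hprew]; simp
        have hDm1 : (pvFlat cs).getD (pvS pre + 0 - 1) 0 = w.2 := by
          rw [show pvS pre + 0 - 1 = pvS pre' + (w.1.toNat - 1) from by
              rw [hprew, pvS_concat]; omega, ← hassocw]
          exact pvD_at pre' w (c :: c' :: suf') _ (by omega)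
        have hLm1 : (pvLramp cs).getD (pvS pre + 0 - 1) 0 = w.1 := by
          rw [show pvS pre + 0 - 1 = pvS pre' + (w.1.toNat - 1) from by
              rw [hprew, pvS_concat]; omega, ← hassocw]
          rw [pvL_at pre' w (c :: c' :: suf') _ (by omega : w.1.toNat - 1 < w.1.toNat)]
          omega
        rw [hDm1] at hsum
        have hgdw : ∀ m v, cs.getD (pre'.length + m) v = (w :: c :: c' :: suf').getD m v := by
          intro m v; rw [← hassocw]; exact getD_decomp pre' w (c :: c' :: suf') m v
        have hlenw : cs.length = pre'.length + 3 + suf'.length := by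
          rw [← hassocw]; simp; omega
        by_cases hext : pvS pre + 0 + 2 < pvS cs ∧
            (pvFlat cs).getD (pvS pre + 0 + 2) 0 = (pvFlat cs).getD (pvS pre + 0 - 1) 0
        · rw [if_pos hext]
          rcases hp2cases hext.1 with ⟨hc2, hv⟩ | ⟨hc1', cc, suf'', hsc, hvcc, hrcc⟩
          · exfalso
            rw [hDm1, hv] at hext
            have hadjwc : w.2 ≠ c.2 := wf_adj cs pre' (c' :: suf') w c hwf (by rw [← hassocw])
            exact hadjwc (by omega)
          · have hccw : cc.2 = w.2 := by rw [hDm1] at hext; rw [← hext.2, hvcc]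
            have hlenw' : cs.length = pre'.length + 4 + suf''.length := by
              rw [← hassocw, hsc]; simp; omega
            have hc'1 : c'.1 = 1 := by omega
            have hmem := memA_L4 cs (pre'.length + 3)
              (by omega)
              (by rw [show pre'.length + 3 - 1 = pre'.length + 2 from by omega, hgdw 2]
                  simpa [hsc] using hc'1)
              (by rw [show pre'.length + 3 - 1 = pre'.length + 2 from by omega,
                    show pre'.length + 3 - 2 = pre'.length + 1 from by omega,
                    hgdw 1, hgdw 2, hgdw 3]
                  simp [hsc]
                  omega)
              (by omega)
              (by rw [show pre'.length + 3 - 2 = pre'.length + 1 from by omega, hgdw 1]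
                  simpa using hc1)
              (by rw [show pre'.length + 3 - 3 = pre'.length + 0 from by omega,
                    hgdw 0, hgdw 3]
                  simpa [hsc] using hccw)
            have hbound := acand_le cs (pre'.length + 3) _ (by omega) hmem
            rw [show pre'.length + 3 - 3 = pre'.length + 0 from by omega, hgdw 0, hgdw 3] at hbound
            simp only [hsc, List.getD_cons_zero, List.getD_cons_succ] at hbound
            rw [hLm1, hrcc]
            omega
        · rw [if_neg hext, hLm1]
          have hgdw0 : cs.getD pre'.length (0, 0) = w := by
            have := hgdw 0 (0, 0)
            simpa using this
          have hmem := memA_R cs pre'.length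
            (by omega)
            (by rw [hgdw 1]; simpa using hc1)
            (by rw [hgdw 1, hgdw 2, hgdw0]; simpa using hsum)
          have hbound := acand_le cs pre'.length _ (by omega) hmem
          rw [hgdw0] at hbound
          omega
      · -- b3 at the boundary
        rw [hD0, hD1] at hsum
        rcases hp2cases hp2 with ⟨hc2, hv⟩ | ⟨hc1', cc, suf'', hsc, hvcc, hrcc⟩
        · exfalso
          rw [hv] at hsum
          exact hadj (by omega)
        · rw [hvcc] at hsum
          have hc'1 : c'.1 = 1 := by omega
          have hlen' : cs.length = pre.length + 3 + suf''.length := by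
            rw [hdec, hsc]; simp; omega
          have hgd2 : ∀ m v, cs.getD (pre.length + m) v = (c :: c' :: cc :: suf'').getD m v := by
            intro m v; rw [hdec, hsc]; exact getD_decomp pre c (c' :: cc :: suf'') m v
          have hmem := memA_L cs (pre.length + 2)
            (by omega)
            (by rw [show pre.length + 2 - 1 = pre.length + 1 from by omega, hgd2 1]
                simpa using hc'1)
            (by rw [show pre.length + 2 - 1 = pre.length + 1 from by omega,
                  show pre.length + 2 - 2 = pre.length + 0 from by omega,
                  hgd2 0, hgd2 1, hgd2 2]
                simpa using hsum)
          have hbound := acand_le cs (pre.length + 2) _ (by omega) hmem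
          rw [hgd2 2] at hbound
          simp only [List.getD_cons_zero, List.getD_cons_succ] at hbound
          rw [hrcc]
          omega
theorem pv_dom (cs : List (Int × Int)) (hwf : pvWf cs) (hne : cs ≠ []) :
    pvFmax 1 (pvCAlist cs) = pvFmax 0 (pvCBlist cs) :=
  le_antisymm (pv_dir1 cs hwf hne) (pv_dir2 cs hwf hne)

theorem pv_main (D : List Int) (hD : D ≠ []) :
    pvLoopA (pvRle D) =
      pvBridgeFold D.length D (pvLvals D) (pvRvals D) (pvRunFold D.length (pvLvals D)) := by
  have hwf : pvWf (pvRle D) := ⟨pvRle_k_pos D, pvRle_chain D⟩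
  have hflat := pvRle_flat D
  have hne : pvRle D ≠ [] := by
    intro h
    apply hD
    rw [← pvRle_flat D, h]
    rfl
  have h := pv_dom (pvRle D) hwf hne
  unfold pvCAlist pvCBlist at h
  rw [← pvLvals_flat _ hwf, ← pvRvals_flat _ hwf,
    show pvS (pvRle D) = (pvFlat (pvRle D)).length from (pvFlat_length _).symm, hflat] at h
  rw [pvLoopA_eq, pvCoreB_eq]
  exact h

theorem pv_diffs_eq (N : Int) (A : List Int) : pvDiffsA N A = pvDiffsB N A := by
  unfold pvDiffsA pvDiffsB
  rw [PySem.List.pyRange_one, PySem.List.pyRange_one]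
  simp only [List.map_map, Int.sub_zero]
  apply List.map_congr_left
  intro k _
  simp only [Function.comp]
  rw [show (1 : Int) + (k : Int) = 0 + k + 1 from by ring]
  rw [show (0 : Int) + (k : Int) + 1 - 1 = 0 + k from by ring]

-- ===== VERDICT (by name: the statement is the Claim_ definition above) =====
theorem solve_spec : Claim_equal_solve := by
  intro N A _ hPre
  unfold Spec_solve solve solve_alt
  by_cases h3 : N ≤ 3
  · simp [h3]
  · have h4 : 4 ≤ N := by omega
    simp only [if_neg h3]
    rw [pv_diffs_eq]
    have hlen : (pvDiffsB N A).length = (N - 1).toNat := by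
      simp [pvDiffsB, List.length_map, PySem.List.length_pyRange_one]
    have hne : pvDiffsB N A ≠ [] := by
      intro h
      rw [h] at hlen
      simp at hlen
      omega
    rw [pv_main _ hne]
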